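-- pv_equiv track=rewrite | github.com/yousif-alnaimi/sigoptim | optimisation/mv_utils.py | half_shuffle
-- ===== SOURCE A (Python) =====
-- import copy
--
-- class Tree:
--     def __init__(self, data):
--         self.children = []
--         self.data = data
--         self.list = [[],[]]
--         self.number = 2
--
-- def _get_paths(t, paths=None, current_path=None):
--     if paths is None:
--         paths = []
--     if current_path is None:
--         current_path = []
--
--     current_path.append(t.data)
--     if len(t.children) == 0:
--         paths.append(current_path)
--     else:
--         for child in t.children:
--             _get_paths(child, paths, list(current_path))
--     return paths
--
-- def half_shuffle(x):
--     """ Input: an iterable objects of lists l1,l2,..,ln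
--         Return: l1 \prec (l2 \prec (ln-1 \prec ln))))))"""
--     for i in range(len(x)):
--         x[i] = x[i][::-1]
--     x0 = x[0].pop()
--     root = Tree(x0)
--     root.list = x
--     #
--     stack = [root]
--     while stack:
--         current_node = stack.pop()
--         for n in range(current_node.number):
--             if current_node.list[n]:
--                 node_list = copy.deepcopy(current_node.list)
--                 node = Tree(node_list[n].pop())
--                 node.number = max([n+2,current_node.number])
--                 node.number = min([node.number,len(current_node.list)])
--                 node.list = node_list
--                 current_node.children.append(node)
--         for node in current_node.children:
--             stack.append(node)
--
--     paths = _get_paths(root)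
--
--     return paths
-- ===== SOURCE B (Python) =====
-- # Simpler: drop the Tree/stack machinery; recursively enumerate interleaving paths directly.
-- # Like A, this mutates x in place (reverses each sublist and pops from x[0]).
-- def half_shuffle(x):
--     """ Input: an iterable objects of lists l1,l2,..,ln
--         Return: l1 \prec (l2 \prec (ln-1 \prec ln))))))"""
--     for i in range(len(x)):
--         x[i] = x[i][::-1]
--     x0 = x[0].pop()
--
--     def rec(lst, number, path):
--         hits = [n for n in range(number) if lst[n]]
--         if not hits:
--             return [path]
--         out = []
--         for n in hits:
--             child = [l[:] for l in lst]
--             v = child[n].pop()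
--             out += rec(child, min(max(n + 2, number), len(lst)), path + [v])
--         return out
--
--     return rec(x, 2, [x0])
-- ===== Notes on version B (the rewrite author's own statement) =====
-- stated objective: simpler
-- what changed: Replaces the Tree class, the explicit stack with mutable node objects, per-node deepcopy and the separate recursive _get_paths traversal by one direct recursion that enumerates the interleaving paths as it goes.
import Mathlib
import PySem

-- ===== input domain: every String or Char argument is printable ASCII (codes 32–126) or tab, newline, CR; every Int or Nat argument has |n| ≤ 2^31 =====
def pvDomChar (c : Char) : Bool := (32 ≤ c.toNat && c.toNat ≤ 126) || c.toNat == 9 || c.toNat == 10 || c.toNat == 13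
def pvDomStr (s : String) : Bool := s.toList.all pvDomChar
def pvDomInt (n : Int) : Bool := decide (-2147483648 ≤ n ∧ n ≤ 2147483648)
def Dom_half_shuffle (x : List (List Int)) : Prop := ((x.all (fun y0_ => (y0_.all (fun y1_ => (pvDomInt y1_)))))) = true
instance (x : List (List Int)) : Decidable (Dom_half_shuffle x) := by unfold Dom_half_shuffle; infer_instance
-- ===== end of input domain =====

-- B replaces A's Tree objects, mutation-by-reference and explicit stack with a direct
-- recursive enumeration of the interleaving paths (objective: simpler).  Like A, the
-- Python B mutates its argument (reverses each sublist, pops from x[0]); the theorems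
-- here are about the RETURN value.

-- ===== PORT A =====
-- A Tree object: its data and the ids (arena indices) of its children.  The Python
-- object graph is modelled as an arena `List ANode`; `Tree.list`/`Tree.number` are
-- carried on the stack next to the node id (they are never mutated after creation).
structure ANode where
  data : Int
  children : List Nat
deriving Repr, DecidableEq

def dANode : ANode := ⟨0, []⟩

-- total number of elements in a node's `list` field
def sizesum (lst : List (List Int)) : Nat := (lst.map List.length).sum

-- current_node.children.append(cid)
def addChild : List ANode → Nat → Nat → List ANode
  | [], _, _ => []
  | nd :: t, 0, cid => { nd with children := nd.children ++ [cid] } :: t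
  | nd :: t, i+1, cid => nd :: addChild t i cid

-- one step of A's `for n in range(current_node.number)` body; state = (arena, kid triples)
def expandStep (lst : List (List Int)) (number id : Nat)
    (st : List ANode × List (Nat × List (List Int) × Nat)) (n : Nat) :
    List ANode × List (Nat × List (List Int) × Nat) :=
  let l := lst.getD n []
  if l.isEmpty then st
  else
    -- node = Tree(node_list[n].pop()); node.number = min(max(n+2, number), len(list))
    let cid := st.1.length
    (addChild (st.1 ++ [⟨l.getLast?.getD 0, []⟩]) id cid,
     st.2 ++ [(cid, lst.set n l.dropLast, min (max (n+2) number) lst.length)])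

-- the whole `for n in range(current_node.number)` loop
def expand (ar : List ANode) (lst : List (List Int)) (number id : Nat) :
    List ANode × List (Nat × List (List Int) × Nat) :=
  (List.range number).foldl (expandStep lst number id) (ar, [])

def stackMeasure (ts : List (Nat × List (List Int) × Nat)) : Nat :=
  (ts.map fun t => (t.2.1.length + 2) ^ sizesum t.2.1).sum

-- facts about `expand`'s kids, needed for `loop`'s/`brec`'s termination (cited below)
theorem sizesum_set_dropLast (lst : List (List Int)) (n : Nat)
    (h : lst.getD n [] ≠ []) :
    sizesum (lst.set n (lst.getD n []).dropLast) + 1 = sizesum lst := by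
  induction lst generalizing n with
  | nil => simp [List.getD] at h
  | cons a t ih =>
    cases n with
    | zero =>
      simp only [List.getD_cons_zero] at h ⊢
      have := @List.length_dropLast _ a
      have ha : 1 ≤ a.length := by cases a with
        | nil => exact absurd rfl h
        | cons b bs => simp
      simp [sizesum, List.set]
      omega
    | succ m =>
      simp only [List.getD_cons_succ] at h ⊢
      simp only [List.set_cons_succ, sizesum, List.map_cons, List.sum_cons]
      have := ih m h
      simp only [sizesum] at this
      omega

theorem filter_range_len_le (p : Nat → Bool) (L : Nat) (h : ∀ n, p n = true → n < L) :
    ∀ m, ((List.range m).filter p).length ≤ min m L := by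
  intro m
  induction m with
  | zero => simp
  | succ k ih =>
    rw [List.range_succ, List.filter_append]
    by_cases hp : p k = true
    · have := h k hp
      simp [hp]
      omega
    · simp [hp]
      omega

theorem expand_fold_facts (lst : List (List Int)) (number id : Nat) :
    ∀ (ns : List Nat) (st : List ANode × List (Nat × List (List Int) × Nat)),
      (∀ k ∈ st.2, k.2.1.length = lst.length ∧ sizesum k.2.1 + 1 = sizesum lst) →
      (∀ k ∈ (ns.foldl (expandStep lst number id) st).2,
         k.2.1.length = lst.length ∧ sizesum k.2.1 + 1 = sizesum lst) ∧
      (ns.foldl (expandStep lst number id) st).2.length ≤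
        st.2.length + (ns.filter (fun n => !(lst.getD n []).isEmpty)).length := by
  intro ns
  induction ns with
  | nil => intro st hst; simpa using hst
  | cons n t ih =>
    intro st hst
    rw [List.foldl_cons]
    by_cases hp : (lst.getD n []).isEmpty = true
    · have hstep : expandStep lst number id st n = st := by
        simp only [expandStep]
        rw [if_pos hp]
      rw [hstep]
      have := ih st hst
      simp only [List.filter_cons, hp, Bool.not_true]
      exact this
    · have hne : lst.getD n [] ≠ [] := by simpa using hp
      have hstep : expandStep lst number id st n =
          (addChild (st.1 ++ [⟨(lst.getD n []).getLast?.getD 0, []⟩]) id st.1.length,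
           st.2 ++ [(st.1.length, lst.set n (lst.getD n []).dropLast,
             min (max (n+2) number) lst.length)]) := by
        simp only [expandStep]
        rw [if_neg hp]
      rw [hstep]
      have hQ : ∀ k ∈ st.2 ++ [(st.1.length, lst.set n (lst.getD n []).dropLast,
             min (max (n+2) number) lst.length)],
          k.2.1.length = lst.length ∧ sizesum k.2.1 + 1 = sizesum lst := by
        intro k hk
        rcases List.mem_append.mp hk with hk | hk
        · exact hst k hk
        · simp at hk
          subst hk
          refine ⟨by simp, sizesum_set_dropLast lst n hne⟩
      have h2 := ih (addChild (st.1 ++ [⟨(lst.getD n []).getLast?.getD 0, []⟩]) id st.1.length,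
        st.2 ++ [(st.1.length, lst.set n (lst.getD n []).dropLast,
          min (max (n+2) number) lst.length)]) hQ
      refine ⟨h2.1, ?_⟩
      have hb : (!(lst.getD n []).isEmpty) = true := by simpa using hp
      simp only [List.filter_cons, hb, if_true, List.length_cons, List.length_append,
        List.length_nil] at h2 ⊢
      omega

theorem expand_kid_facts (ar : List ANode) (lst : List (List Int)) (number id : Nat) :
    (∀ k ∈ (expand ar lst number id).2,
       k.2.1.length = lst.length ∧ sizesum k.2.1 + 1 = sizesum lst) ∧
    (expand ar lst number id).2.length ≤ lst.length := by
  have h := expand_fold_facts lst number id (List.range number) (ar, []) (by simp)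
  refine ⟨h.1, ?_⟩
  have hf := filter_range_len_le (fun n => !(lst.getD n []).isEmpty) lst.length
    (fun n hn => by
      have : lst.getD n [] ≠ [] := by simpa using hn
      by_contra hL
      push Not at hL
      rw [List.getD_eq_default] at this
      · exact this rfl
      · omega) number
  have h2 := h.2
  simp only [List.length_nil] at h2
  unfold expand
  omega

theorem loop_measure_lt (ar : List ANode) (t : Nat × List (List Int) × Nat)
    (rest : List (Nat × List (List Int) × Nat)) :
    stackMeasure ((expand ar t.2.1 t.2.2 t.1).2.reverse ++ rest) < stackMeasure (t :: rest) := by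
  obtain ⟨id, lst, number⟩ := t
  have hk := expand_kid_facts ar lst number id
  set kids := (expand ar lst number id).2 with hkids
  simp only [stackMeasure, List.map_append, List.sum_append, List.map_reverse,
    List.sum_reverse, List.map_cons, List.sum_cons]
  have hrest : ∀ (z : Nat), z < (lst.length + 2) ^ sizesum lst →
      z + (rest.map fun t => (t.2.1.length + 2) ^ sizesum t.2.1).sum <
      (lst.length + 2) ^ sizesum lst + (rest.map fun t => (t.2.1.length + 2) ^ sizesum t.2.1).sum := by
    intro z hz; omega
  apply hrest
  rcases List.eq_nil_or_concat kids with hnil | ⟨_, _, hcons⟩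
  · rw [hnil]
    simp
  · -- kids nonempty: every term is (L+2)^(s-1), count ≤ L < L+2
    have hne : kids ≠ [] := by rw [hcons]; simp
    obtain ⟨k0, hk0⟩ : ∃ k, k ∈ kids := List.exists_mem_of_ne_nil kids hne
    have hs1 : 1 ≤ sizesum lst := by have := (hk.1 k0 hk0).2; omega
    set L := lst.length
    set T := (L + 2) ^ (sizesum lst - 1) with hT
    have hsum : ((kids.map fun t => (t.2.1.length + 2) ^ sizesum t.2.1)).sum ≤ kids.length * T := by
      have : ∀ z ∈ kids.map fun t => (t.2.1.length + 2) ^ sizesum t.2.1, z ≤ T := by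
        intro z hz
        rw [List.mem_map] at hz
        obtain ⟨k, hkm, hzk⟩ := hz
        have h1 := (hk.1 k hkm).1
        have h2 := (hk.1 k hkm).2
        rw [← hzk, h1]
        have : sizesum k.2.1 = sizesum lst - 1 := by omega
        rw [this]
      calc ((kids.map fun t => (t.2.1.length + 2) ^ sizesum t.2.1)).sum
          ≤ (kids.map fun t => (t.2.1.length + 2) ^ sizesum t.2.1).length * T :=
            by simpa using List.sum_le_card_nsmul _ T this
        _ = kids.length * T := by simp
    have hTpos : 0 < T := pow_pos (by omega) _
    have hpow : (L + 2) ^ sizesum lst = (L + 2) * T := by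
      rw [hT, ← pow_succ']
      congr 1
      omega
    have hlen : kids.length ≤ L := hk.2
    calc ((kids.map fun t => (t.2.1.length + 2) ^ sizesum t.2.1)).sum
        ≤ kids.length * T := hsum
      _ ≤ L * T := Nat.mul_le_mul_right T hlen
      _ < (L + 2) * T := by
          exact (Nat.mul_lt_mul_right hTpos).mpr (by omega)
      _ = (L + 2) ^ sizesum lst := hpow.symm

-- `while stack:` — pop, expand, append children to the stack (head = top of stack)
def loop : List ANode → List (Nat × List (List Int) × Nat) → List ANode
  | ar, [] => ar
  | ar, t :: rest =>
      loop (expand ar t.2.1 t.2.2 t.1).1 ((expand ar t.2.1 t.2.2 t.1).2.reverse ++ rest)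
termination_by _ st => stackMeasure st
decreasing_by exact loop_measure_lt _ _ _

-- _get_paths; `fuel` only totalizes the recursion over node ids (never exhausted on
-- the arena `loop` builds, as the proofs below show)
def getPaths (ar : List ANode) : Nat → Nat → List (List Int) → List Int → List (List Int)
  | 0, _, paths, _ => paths
  | fuel+1, id, paths, cur =>
      let nd := ar.getD id dANode
      let cur2 := cur ++ [nd.data]
      if nd.children.isEmpty then paths ++ [cur2]
      else nd.children.foldl (fun ps c => getPaths ar fuel c ps cur2) paths

def half_shuffle (x : List (List Int)) : List (List Int) :=
  let x1 := x.map List.reverse            -- for i in range(len(x)): x[i] = x[i][::-1]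
  let l0 := x1.getD 0 []
  let x0 := l0.getLast?.getD 0            -- x0 = x[0].pop()  (IndexError cases excluded by Pre_)
  let x2 := x1.set 0 l0.dropLast
  let ar := loop [⟨x0, []⟩] [(0, x2, 2)]  -- root = Tree(x0); root.list = x; build via the stack
  getPaths ar ar.length 0 [] []           -- return _get_paths(root)

-- ===== PORT B =====
def brec (lst : List (List Int)) (number : Nat) (path : List Int) : List (List Int) :=
  let hits := (List.range number).filter (fun n => !(lst.getD n []).isEmpty)
  if hits.isEmpty then [path]
  else hits.attach.flatMap (fun nh =>
    let l := lst.getD nh.1 []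
    brec (lst.set nh.1 l.dropLast) (min (max (nh.1+2) number) lst.length)
      (path ++ [l.getLast?.getD 0]))
termination_by sizesum lst
decreasing_by
  have hp : !(lst.getD nh.1 []).isEmpty := (List.mem_filter.mp nh.2).2
  have hne : lst.getD nh.1 [] ≠ [] := by simpa using hp
  have := sizesum_set_dropLast lst nh.1 hne
  omega

def half_shuffle_alt (x : List (List Int)) : List (List Int) :=
  let x1 := x.map List.reverse
  let l0 := x1.getD 0 []
  brec (x1.set 0 l0.dropLast) 2 [l0.getLast?.getD 0]

-- ===== PRECONDITION & SPEC =====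
-- Pre_ excludes exactly the inputs where the Python A raises IndexError:
-- len(x) < 2 (root loop reads x[1]) or empty x[0] (x[0].pop()); Python B raises there too.
def Pre_half_shuffle (x : List (List Int)) : Prop := 2 ≤ x.length ∧ x.getD 0 [] ≠ []
instance (x : List (List Int)) : Decidable (Pre_half_shuffle x) := by
  unfold Pre_half_shuffle; infer_instance

def pvWitness_half_shuffle : List (List Int) := [[1, 2], [3]]

def Spec_half_shuffle (x : List (List Int)) (out : List (List Int)) : Prop := out = half_shuffle_alt x
instance (x : List (List Int)) (out : List (List Int)) : Decidable (Spec_half_shuffle x out) := by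
  unfold Spec_half_shuffle; infer_instance

-- ===== CLAIM (what is proved, stated in full; the proofs are below) =====
def Claim_equal_half_shuffle : Prop :=
  ∀ (x : List (List Int)), Dom_half_shuffle x → Pre_half_shuffle x →
    Spec_half_shuffle x (half_shuffle x)

-- ===== LEMMAS AND PROOFS =====

-- proof-side helpers: the child node created for hit n of a node with fields (lst, number)
def childLst (lst : List (List Int)) (n : Nat) : List (List Int) := lst.set n (lst.getD n []).dropLast
def childNum (lst : List (List Int)) (number n : Nat) : Nat := min (max (n+2) number) lst.length
def childDat (lst : List (List Int)) (n : Nat) : Int := (lst.getD n []).getLast?.getD 0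
def hitsOf (lst : List (List Int)) (number : Nat) : List Nat :=
  (List.range number).filter (fun n => !(lst.getD n []).isEmpty)

theorem mem_hitsOf_sizesum {lst : List (List Int)} {number n : Nat} (h : n ∈ hitsOf lst number) :
    sizesum (childLst lst n) + 1 = sizesum lst := by
  have hp := (List.mem_filter.mp h).2
  exact sizesum_set_dropLast lst n (by simpa using hp)

-- depth of the tree grown from a node with fields (lst, number)
def depthD (lst : List (List Int)) (number : Nat) : Nat :=
  1 + ((hitsOf lst number).attach.map
        (fun nh => depthD (childLst lst nh.1) (childNum lst number nh.1))).foldl max 0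
termination_by sizesum lst
decreasing_by
  have := mem_hitsOf_sizesum nh.2
  omega

theorem depthD_pos (lst : List (List Int)) (number : Nat) : 1 ≤ depthD lst number := by
  rw [depthD]; omega

theorem mem_depthD_le {lst : List (List Int)} {number n : Nat} (h : n ∈ hitsOf lst number) :
    depthD (childLst lst n) (childNum lst number n) + 1 ≤ depthD lst number := by
  conv_rhs => rw [depthD]
  have hmem : depthD (childLst lst n) (childNum lst number n) ∈
      ((hitsOf lst number).attach.map
        (fun nh => depthD (childLst lst nh.1) (childNum lst number nh.1))) := by
    exact List.mem_map.mpr ⟨⟨n, h⟩, by simp, rfl⟩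
  have := (PySem.List.le_foldl_max ((hitsOf lst number).attach.map
        (fun nh => depthD (childLst lst nh.1) (childNum lst number nh.1))) 0).2 _ hmem
  omega

-- brec, re-stated through the helpers
theorem brec_eq (lst : List (List Int)) (number : Nat) (path : List Int) :
    brec lst number path =
      if (hitsOf lst number).isEmpty then [path]
      else (hitsOf lst number).flatMap
        (fun n => brec (childLst lst n) (childNum lst number n) (path ++ [childDat lst n])) := by
  rw [brec]
  by_cases h : (hitsOf lst number).isEmpty
  · simp only [hitsOf] at h; rw [if_pos h, if_pos (by exact h)]
  · simp only [hitsOf] at h; rw [if_neg h, if_neg (by exact h)]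
    simp [List.flatMap, childLst, childNum, childDat, hitsOf]

-- arena with ids appended to the children of entry id (addChild folded)
def withKids : List ANode → Nat → List Nat → List ANode
  | [], _, _ => []
  | nd :: t, 0, ids => { nd with children := nd.children ++ ids } :: t
  | nd :: t, i+1, ids => nd :: withKids t i ids

-- the kid triples / kid nodes created for hits hs when the arena had length b0
def kidTriples (b0 : Nat) (lst : List (List Int)) (number : Nat) (hs : List Nat) :
    List (Nat × List (List Int) × Nat) :=
  (hs.zipIdx).map (fun p => (b0 + p.2, childLst lst p.1, childNum lst number p.1))
def kidNodes (lst : List (List Int)) (hs : List Nat) : List ANode :=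
  hs.map (fun n => (⟨childDat lst n, []⟩ : ANode))

theorem withKids_length (ar : List ANode) (id : Nat) (ids : List Nat) :
    (withKids ar id ids).length = ar.length := by
  induction ar generalizing id with
  | nil => rfl
  | cons a t ih => cases id with
    | zero => simp [withKids]
    | succ i => simp [withKids, ih]

theorem withKids_nil (ar : List ANode) (id : Nat) : withKids ar id [] = ar := by
  induction ar generalizing id with
  | nil => rfl
  | cons a t ih => cases id with
    | zero => simp [withKids]
    | succ i => simp [withKids, ih]

theorem withKids_withKids (ar : List ANode) (id : Nat) (a b : List Nat) :
    withKids (withKids ar id a) id b = withKids ar id (a ++ b) := by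
  induction ar generalizing id with
  | nil => rfl
  | cons nd t ih => cases id with
    | zero => simp [withKids]
    | succ i => simp [withKids, ih]

theorem addChild_eq_withKids (ar : List ANode) (id cid : Nat) :
    addChild ar id cid = withKids ar id [cid] := by
  induction ar generalizing id with
  | nil => rfl
  | cons nd t ih => cases id with
    | zero => simp [withKids, addChild]
    | succ i => simp [withKids, addChild, ih]

theorem withKids_append (ys zs : List ANode) (id : Nat) (h : id < ys.length) (ids : List Nat) :
    withKids (ys ++ zs) id ids = withKids ys id ids ++ zs := by
  induction ys generalizing id with
  | nil => simp at h
  | cons nd t ih => cases id with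
    | zero => simp [withKids]
    | succ i => simp only [List.cons_append, withKids, List.cons.injEq, true_and]
                exact ih i (by simpa using h)

theorem withKids_getD_ne (ar : List ANode) (id : Nat) (ids : List Nat) (j : Nat) (h : j ≠ id) :
    (withKids ar id ids).getD j dANode = ar.getD j dANode := by
  induction ar generalizing id j with
  | nil => rfl
  | cons nd t ih => cases id with
    | zero => cases j with
      | zero => exact absurd rfl h
      | succ m => simp [withKids]
    | succ i => cases j with
      | zero => simp [withKids]
      | succ m => simp only [withKids, List.getD_cons_succ]
                  exact ih i m (by omega)

theorem withKids_getD_eq (ar : List ANode) (id : Nat) (ids : List Nat) (h : id < ar.length) :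
    (withKids ar id ids).getD id dANode =
      { ar.getD id dANode with children := (ar.getD id dANode).children ++ ids } := by
  induction ar generalizing id with
  | nil => simp at h
  | cons nd t ih => cases id with
    | zero => simp [withKids]
    | succ i => simp only [withKids, List.getD_cons_succ]
                exact ih i (by simpa using h)

theorem expandStep_miss (lst : List (List Int)) (number id : Nat)
    (st : List ANode × List (Nat × List (List Int) × Nat)) (n : Nat)
    (h : (lst.getD n []).isEmpty = true) : expandStep lst number id st n = st := by
  simp only [expandStep]; rw [if_pos h]

theorem expandStep_hit (lst : List (List Int)) (number id : Nat)
    (st : List ANode × List (Nat × List (List Int) × Nat)) (n : Nat)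
    (h : ¬ (lst.getD n []).isEmpty = true) :
    expandStep lst number id st n =
      (addChild (st.1 ++ [⟨childDat lst n, []⟩]) id st.1.length,
       st.2 ++ [(st.1.length, childLst lst n, childNum lst number n)]) := by
  simp only [expandStep]; rw [if_neg h]; rfl

theorem expand_fold_closed (lst : List (List Int)) (number id : Nat)
    (ar : List ANode) (hid : id < ar.length) :
    ∀ (ns hs : List Nat),
      ns.foldl (expandStep lst number id)
        (withKids ar id ((List.range hs.length).map (ar.length + ·)) ++ kidNodes lst hs,
         kidTriples ar.length lst number hs) =
      (withKids ar id ((List.range (hs ++ ns.filter (fun n => !(lst.getD n []).isEmpty)).length).map (ar.length + ·))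
         ++ kidNodes lst (hs ++ ns.filter (fun n => !(lst.getD n []).isEmpty)),
       kidTriples ar.length lst number (hs ++ ns.filter (fun n => !(lst.getD n []).isEmpty))) := by
  intro ns
  induction ns with
  | nil => intro hs; simp
  | cons n t ih =>
    intro hs
    rw [List.foldl_cons, List.filter_cons]
    by_cases hp : (lst.getD n []).isEmpty = true
    · rw [expandStep_miss lst number id _ n hp]
      have : (!(lst.getD n []).isEmpty) = false := by
        simp only [Bool.not_eq_false']; exact hp
      rw [this]
      simpa using ih hs
    · have hb : (!(lst.getD n []).isEmpty) = true := by simp at hp ⊢; exact hp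
      rw [expandStep_hit lst number id _ n hp, hb]
      have hlen1 : (withKids ar id ((List.range hs.length).map (ar.length + ·))
          ++ kidNodes lst hs).length = ar.length + hs.length := by
        simp [withKids_length, kidNodes]
      -- arena component
      have harena : addChild ((withKids ar id ((List.range hs.length).map (ar.length + ·))
            ++ kidNodes lst hs) ++ [⟨childDat lst n, []⟩]) id
            (withKids ar id ((List.range hs.length).map (ar.length + ·)) ++ kidNodes lst hs).length =
          withKids ar id ((List.range (hs ++ [n]).length).map (ar.length + ·))
            ++ kidNodes lst (hs ++ [n]) := by
        rw [hlen1, addChild_eq_withKids, List.append_assoc,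
            withKids_append _ _ id (by rw [withKids_length]; exact hid),
            withKids_withKids]
        congr 1
        · congr 1
          rw [List.length_append, List.length_singleton, List.range_succ, List.map_append]
          rfl
        · simp [kidNodes]
      rw [harena, hlen1]
      have htrip : kidTriples ar.length lst number hs
            ++ [(ar.length + hs.length, childLst lst n, childNum lst number n)] =
          kidTriples ar.length lst number (hs ++ [n]) := by
        simp [kidTriples, List.zipIdx_append]
      rw [htrip]
      have := ih (hs ++ [n])
      simpa using this

theorem expand_closed (ar : List ANode) (lst : List (List Int)) (number id : Nat)
    (hid : id < ar.length) :
    expand ar lst number id =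
      (withKids ar id ((List.range (hitsOf lst number).length).map (ar.length + ·))
         ++ kidNodes lst (hitsOf lst number),
       kidTriples ar.length lst number (hitsOf lst number)) := by
  have := expand_fold_closed lst number id ar hid (List.range number) []
  simp only [List.nil_append] at this
  unfold expand
  simp only [hitsOf]
  rw [← this]
  congr 1
  simp [withKids_nil, kidNodes, kidTriples]

theorem loop_cons_eq (ar : List ANode) (t : Nat × List (List Int) × Nat)
    (rest : List (Nat × List (List Int) × Nat)) :
    loop ar (t :: rest) =
      loop (expand ar t.2.1 t.2.2 t.1).1 ((expand ar t.2.1 t.2.2 t.1).2.reverse ++ rest) := by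
  rw [loop]

theorem loop_append_aux : ∀ (m : Nat) (s1 : List (Nat × List (List Int) × Nat)),
    stackMeasure s1 ≤ m → ∀ (ar : List ANode) (s2 : List (Nat × List (List Int) × Nat)),
    loop ar (s1 ++ s2) = loop (loop ar s1) s2 := by
  intro m
  induction m with
  | zero =>
    intro s1 hm ar s2
    cases s1 with
    | nil => simp [loop]
    | cons t r =>
      exfalso
      have h1 : 0 < (t.2.1.length + 2) ^ sizesum t.2.1 := pow_pos (by omega) _
      simp only [stackMeasure, List.map_cons, List.sum_cons] at hm
      omega
  | succ k ih =>
    intro s1 hm ar s2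
    cases s1 with
    | nil => simp [loop]
    | cons t r =>
      rw [List.cons_append, loop_cons_eq, loop_cons_eq, ← List.append_assoc]
      have hlt := loop_measure_lt ar t r
      exact ih _ (by omega) _ s2

theorem loop_append (ar : List ANode) (s1 s2 : List (Nat × List (List Int) × Nat)) :
    loop ar (s1 ++ s2) = loop (loop ar s1) s2 :=
  loop_append_aux (stackMeasure s1) s1 le_rfl ar s2

theorem foldl_max_mem (l : List Nat) (a : Nat) : l.foldl max a ∈ a :: l := by
  induction l generalizing a with
  | nil => simp
  | cons b t ih =>
    rw [List.foldl_cons]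
    have := ih (max a b)
    rcases List.mem_cons.mp this with h | h
    · rcases max_choice a b with hm | hm <;> rw [hm] at h <;> simp [hm, h]
    · simp [h]

-- everything the recursion knows about processing one stack entry (id, lst, number)
def MainP (lst : List (List Int)) (number : Nat) : Prop :=
  ∀ (ar : List ANode) (id : Nat), id < ar.length → (ar.getD id dANode).children = [] →
    (ar.length + (depthD lst number - 1) ≤ (loop ar [(id, lst, number)]).length) ∧
    (∀ j, j < ar.length → j ≠ id →
       (loop ar [(id, lst, number)]).getD j dANode = ar.getD j dANode) ∧
    (∀ (ar₂ : List ANode) (fuel : Nat) (paths : List (List Int)) (cur : List Int),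
       depthD lst number ≤ fuel →
       (∀ j, (j = id ∨ (ar.length ≤ j ∧ j < (loop ar [(id, lst, number)]).length)) →
          ar₂.getD j dANode = (loop ar [(id, lst, number)]).getD j dANode) →
       getPaths ar₂ fuel id paths cur = paths ++ brec lst number (cur ++ [(ar.getD id dANode).data]))

-- processing the reversed kid stack entries for the hits hs
theorem inner_lemma (s : Nat)
    (IH : ∀ s', s' < s → ∀ lst number, sizesum lst = s' → MainP lst number)
    (lst : List (List Int)) (number : Nat) (hs0 : sizesum lst = s) :
    ∀ (hs : List Nat), (∀ n ∈ hs, n ∈ hitsOf lst number) →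
    ∀ (b0 : Nat) (B : List ANode), b0 + hs.length ≤ B.length →
    (∀ k, (hk : k < hs.length) → B.getD (b0+k) dANode = ⟨childDat lst hs[k], []⟩) →
    (B.length ≤ (loop B (kidTriples b0 lst number hs).reverse).length) ∧
    (∀ j, j < B.length → (∀ k, k < hs.length → j ≠ b0 + k) →
       (loop B (kidTriples b0 lst number hs).reverse).getD j dANode = B.getD j dANode) ∧
    (∀ n ∈ hs, B.length + (depthD (childLst lst n) (childNum lst number n) - 1) ≤
       (loop B (kidTriples b0 lst number hs).reverse).length) ∧
    (∀ (ar₂ : List ANode) (fuel : Nat) (paths : List (List Int)) (cur : List Int),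
       (∀ n ∈ hs, depthD (childLst lst n) (childNum lst number n) ≤ fuel) →
       (∀ j, ((∃ k, k < hs.length ∧ j = b0+k) ∨
              (B.length ≤ j ∧ j < (loop B (kidTriples b0 lst number hs).reverse).length)) →
          ar₂.getD j dANode = (loop B (kidTriples b0 lst number hs).reverse).getD j dANode) →
       ((List.range hs.length).map (b0 + ·)).foldl (fun ps c => getPaths ar₂ fuel c ps cur) paths
         = paths ++ hs.flatMap (fun n =>
             brec (childLst lst n) (childNum lst number n) (cur ++ [childDat lst n]))) := by
  intro hs
  induction hs using List.reverseRecOn with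
  | nil =>
    intro _ b0 B _ _
    simp only [kidTriples, List.zipIdx_nil, List.map_nil, List.reverse_nil]
    rw [show loop B [] = B from by rw [loop]]
    refine ⟨le_rfl, fun j _ _ => rfl, by simp, ?_⟩
    intro ar₂ fuel paths cur _ _
    simp
  | append_singleton hs' n IHin =>
    intro hmem b0 B hblen hbnodes
    have hmemn : n ∈ hitsOf lst number := hmem n (by simp)
    have hsn : sizesum (childLst lst n) + 1 = s := by
      rw [← hs0]; exact mem_hitsOf_sizesum hmemn
    set cid := b0 + hs'.length with hcid
    set clst := childLst lst n with hclst
    set cnum := childNum lst number n with hcnum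
    have hsplit : kidTriples b0 lst number (hs' ++ [n]) =
        kidTriples b0 lst number hs' ++ [(cid, clst, cnum)] := by
      simp [kidTriples, List.zipIdx_append, hcid, hclst, hcnum]
    have hP : MainP clst cnum := IH (sizesum clst) (by omega) clst cnum rfl
    have hcid_lt : cid < B.length := by simp at hblen; omega
    have hcid_node : B.getD cid dANode = ⟨childDat lst n, []⟩ := by
      have := hbnodes hs'.length (by simp)
      simpa using this
    obtain ⟨C5, C2, C3⟩ := hP B cid hcid_lt (by rw [hcid_node])
    set C := loop B [(cid, clst, cnum)] with hC
    have hdn := depthD_pos clst cnum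
    have hBC : B.length ≤ C.length := by omega
    have hloopsplit : loop B (kidTriples b0 lst number (hs' ++ [n])).reverse =
        loop C (kidTriples b0 lst number hs').reverse := by
      rw [hsplit, List.reverse_append, List.reverse_singleton, List.singleton_append,
          ← List.singleton_append, loop_append]
    obtain ⟨J1, J2, J3, J4⟩ := IHin (fun n' hn' => hmem n' (by simp [hn']))
      b0 C (by simp at hblen ⊢; omega)
      (by intro k hk
          rw [C2 (b0+k) (by omega) (by omega)]
          have := hbnodes k (by simp; omega)
          rwa [List.getElem_append_left hk] at this)
    rw [hloopsplit]
    refine ⟨by omega, ?_, ?_, ?_⟩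
    · -- unchanged entries
      intro j hj hjk
      rw [J2 j (by omega) (fun k hk => hjk k (by simp; omega))]
      exact C2 j hj (hjk hs'.length (by simp))
    · -- length grows by each kid's depth
      intro n' hn'
      rcases List.mem_append.mp hn' with h | h
      · have := J3 n' h
        omega
      · simp at h
        subst h
        rw [← hclst, ← hcnum]
        omega
    · -- the getPaths fold
      intro ar₂ fuel paths cur hfuel hagree
      have hids : (List.range (hs' ++ [n]).length).map (b0 + ·) =
          (List.range hs'.length).map (b0 + ·) ++ [cid] := by
        simp [List.range_succ]
        omega
      rw [hids, List.foldl_append]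
      have hstep1 := J4 ar₂ fuel paths cur
        (fun n' hn' => hfuel n' (by simp [hn']))
        (by intro j hj
            rcases hj with ⟨k, hk, rfl⟩ | ⟨hj1, hj2⟩
            · exact hagree _ (Or.inl ⟨k, by simp; omega, rfl⟩)
            · exact hagree _ (Or.inr ⟨by omega, hj2⟩))
      rw [hstep1]
      have htrans : ∀ j, (j = cid ∨ (B.length ≤ j ∧ j < C.length)) →
          ar₂.getD j dANode = C.getD j dANode := by
        intro j hj
        have hRj : ar₂.getD j dANode =
            (loop C (kidTriples b0 lst number hs').reverse).getD j dANode := by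
          rcases hj with rfl | ⟨hj1, hj2⟩
          · exact hagree _ (Or.inl ⟨hs'.length, by simp, by omega⟩)
          · exact hagree _ (Or.inr ⟨by omega, by omega⟩)
        rw [hRj]
        rcases hj with rfl | ⟨hj1, hj2⟩
        · exact J2 cid (by omega) (fun k hk => by omega)
        · exact J2 j (by omega) (fun k hk => by simp at hblen; omega)
      have hstep2 := C3 ar₂ fuel (paths ++ hs'.flatMap (fun n' =>
          brec (childLst lst n') (childNum lst number n') (cur ++ [childDat lst n'])))
        cur (hfuel n (by simp)) htrans
      rw [List.foldl_cons, List.foldl_nil, hstep2, hcid_node]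
      simp [hclst, hcnum]

theorem kidNodes_getD (lst : List (List Int)) (hs : List Nat) (k : Nat) (hk : k < hs.length) :
    (kidNodes lst hs).getD k dANode = ⟨childDat lst hs[k], []⟩ := by
  simp [kidNodes, List.getD_eq_getElem?_getD, List.getElem?_map, List.getElem?_eq_getElem hk]

theorem main_lemma : ∀ (s : Nat) (lst : List (List Int)) (number : Nat),
    sizesum lst = s → MainP lst number := by
  intro s
  induction s using Nat.strong_induction_on with
  | _ s IH =>
  intro lst number hsz ar id hid hch
  set hits := hitsOf lst number with hhits
  set ids := (List.range hits.length).map (ar.length + ·) with hids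
  set AR1 := withKids ar id ids ++ kidNodes lst hits with hAR1
  have hloop : loop ar [(id, lst, number)] = loop AR1 (kidTriples ar.length lst number hits).reverse := by
    rw [loop_cons_eq]
    rw [show (expand ar (id, lst, number).2.1 (id, lst, number).2.2 (id, lst, number).1) = expand ar lst number id from rfl]
    rw [expand_closed ar lst number id hid]
    rw [List.append_nil]
  have hlen1 : AR1.length = ar.length + hits.length := by
    simp [hAR1, withKids_length, kidNodes, hids]
  have hnodes : ∀ k, (hk : k < hits.length) → AR1.getD (ar.length + k) dANode = ⟨childDat lst hits[k], []⟩ := by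
    intro k hk
    rw [hAR1, List.getD_append_right _ _ _ _ (by rw [withKids_length]; omega)]
    rw [withKids_length]
    have : ar.length + k - ar.length = k := by omega
    rw [this, kidNodes_getD lst hits k hk]
  have hIH : ∀ s', s' < s → ∀ lst' number', sizesum lst' = s' → MainP lst' number' := by
    intro s' hs' ; exact IH s' hs'
  obtain ⟨I1, I2, I3, I4⟩ := inner_lemma s hIH lst number hsz hits (fun n hn => hn)
    ar.length AR1 (le_of_eq hlen1.symm) hnodes
  rw [hloop]
  set R := loop AR1 (kidTriples ar.length lst number hits).reverse with hR
  have hgetid : R.getD id dANode = ⟨(ar.getD id dANode).data, ids⟩ := by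
    rw [I2 id (by omega) (by intro k hk; omega)]
    rw [hAR1, List.getD_append _ _ _ _ (by rw [withKids_length]; omega)]
    rw [withKids_getD_eq ar id ids hid, hch]
    simp
  refine ⟨?_, ?_, ?_⟩
  · -- M5
    by_cases hh : hits = []
    · rw [depthD, ← hhits, hh]
      simp only [List.attach_nil, List.map_nil, List.foldl_nil]
      have := I1
      omega
    · have hlen0 : 1 ≤ hits.length := by
        have := List.length_pos_of_ne_nil hh
        omega
      set l := (hitsOf lst number).attach.map
          (fun nh => depthD (childLst lst nh.1) (childNum lst number nh.1)) with hl
      have hmx := foldl_max_mem l 0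
      rcases List.mem_cons.mp hmx with h0 | hmem
      · -- foldl = 0 impossible: l has an element ≥ 1 that is ≤ foldl
        exfalso
        obtain ⟨n0, hn0⟩ := List.exists_mem_of_ne_nil hits hh
        have hel : depthD (childLst lst n0) (childNum lst number n0) ∈ l := by
          rw [hl]
          exact List.mem_map.mpr ⟨⟨n0, by rw [← hhits]; exact hn0⟩, by simp, rfl⟩
        have hle := (PySem.List.le_foldl_max l 0).2 _ hel
        have := depthD_pos (childLst lst n0) (childNum lst number n0)
        omega
      · obtain ⟨nh, _, hnh⟩ := List.mem_map.mp hmem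
        have hI3 := I3 nh.1 (by rw [hhits]; exact nh.2)
        have hd : depthD lst number = 1 + l.foldl max 0 := by rw [depthD, ← hhits, ← hl]
        rw [hd, ← hnh]
        omega
  · -- M2
    intro j hj hjid
    rw [I2 j (by omega) (by intro k hk; omega)]
    rw [hAR1, List.getD_append _ _ _ _ (by rw [withKids_length]; omega)]
    exact withKids_getD_ne ar id ids j hjid
  · -- M3
    intro ar₂ fuel paths cur hfuel hagree
    have hf1 : 1 ≤ fuel := le_trans (depthD_pos _ _) hfuel
    obtain ⟨f, rfl⟩ : ∃ f, fuel = f + 1 := ⟨fuel - 1, by omega⟩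
    have hnd : ar₂.getD id dANode = ⟨(ar.getD id dANode).data, ids⟩ := by
      rw [hagree id (Or.inl rfl)]; exact hgetid
    simp only [getPaths, hnd]
    by_cases hh : hits = []
    · have hids0 : ids = [] := by rw [hids, hh]; simp
      rw [brec_eq, ← hhits, hh]
      simp [hids0]
    · have hlen0 : 1 ≤ hits.length := by
        have := List.length_pos_of_ne_nil hh
        omega
      have hids_ne : ids ≠ [] := by
        rw [hids, ← List.length_pos_iff, List.length_map, List.length_range]
        omega
      rw [if_neg (by simp [List.isEmpty_iff, hids_ne])]
      have hI4 := I4 ar₂ f paths (cur ++ [(ar.getD id dANode).data])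
        (by intro n hn
            have := mem_depthD_le (by rw [hhits] at hn; exact hn)
            omega)
        (by intro j hj
            rcases hj with ⟨k, hk, rfl⟩ | ⟨hj1, hj2⟩
            · exact hagree _ (Or.inr ⟨by omega, by have := I1; omega⟩)
            · exact hagree _ (Or.inr ⟨by omega, hj2⟩))
      rw [hI4, brec_eq, ← hhits, if_neg (by simp [hh])]


theorem half_shuffle_eq_alt (x : List (List Int)) : half_shuffle x = half_shuffle_alt x := by
  simp only [half_shuffle, half_shuffle_alt]
  set x1 := x.map List.reverse with hx1
  set l0 := x1.getD 0 [] with hl0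
  set x0 := l0.getLast?.getD 0 with hx0
  set x2 := x1.set 0 l0.dropLast with hx2
  set ar0 : List ANode := [⟨x0, []⟩] with har0
  set R := loop ar0 [(0, x2, 2)] with hR
  obtain ⟨M5, M2, M3⟩ := main_lemma (sizesum x2) x2 2 rfl ar0 0 (by simp [har0]) (by simp [har0])
  have hdp := depthD_pos x2 2
  have hfuel : depthD x2 2 ≤ R.length := by
    rw [← hR] at M5
    simp only [har0, List.length_singleton] at M5
    omega
  rw [← hR] at M3
  rw [M3 R R.length [] [] hfuel (fun j _ => rfl)]
  simp [har0, dANode]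

-- ===== VERDICT (by name: the statement is the Claim_ definition above) =====
theorem half_shuffle_spec : Claim_equal_half_shuffle := by
  intro x _ _
  unfold Spec_half_shuffle
  exact half_shuffle_eq_alt x
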